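-- pv_equiv track=rewrite | github.com/shriya-03/Shriya | 24july.py | fibonacci_skip
-- ===== SOURCE A (Python) =====
-- def fibonacci_skip(n):
--     fib = [1, 1]
--     while len(fib) < n:
--         fib.append(fib[-1] + fib[-2])
--
--     result = []
--     for i in range(n):
--         result.append(str(fib[i]))
--         if i % 2 == 0 and i != n - 1:  # Add 'skip' after every even index except last
--             result.append("skip")
--
--     return ' '.join(result)
-- ===== SOURCE B (Python) =====
-- def fibonacci_skip(n):
--     # Stride-2 emitter: each loop turn handles a consecutive even/odd index PAIR,
--     # emitting three tokens unconditionally, so no parity test i % 2 is ever done;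
--     # Fibonacci advances two steps at a time via (a, b) -> (a+b, a+2b).
--     # A lone trailing even index (odd n) is emitted by the post-loop fixup, skip-free.
--     parts = []
--     a, b = 1, 1
--     i = 0
--     while i < n - 1:
--         parts += [str(a), "skip", str(b)]
--         a, b = a + b, a + 2 * b
--         i += 2
--     if i < n:
--         parts.append(str(a))
--     return ' '.join(parts)
-- ===== Notes on version B (the rewrite author's own statement) =====
-- stated objective: alternative
-- what changed: Replaced A's precompute-then-scan loops by a recursive stride-2 emitter that consumes indices two at a time, eliminating the parity test i % 2 entirely (the even/odd distinction is structural) and advancing Fibonacci two steps per call with (a,b)->(a+b,a+2b).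
import Mathlib
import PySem

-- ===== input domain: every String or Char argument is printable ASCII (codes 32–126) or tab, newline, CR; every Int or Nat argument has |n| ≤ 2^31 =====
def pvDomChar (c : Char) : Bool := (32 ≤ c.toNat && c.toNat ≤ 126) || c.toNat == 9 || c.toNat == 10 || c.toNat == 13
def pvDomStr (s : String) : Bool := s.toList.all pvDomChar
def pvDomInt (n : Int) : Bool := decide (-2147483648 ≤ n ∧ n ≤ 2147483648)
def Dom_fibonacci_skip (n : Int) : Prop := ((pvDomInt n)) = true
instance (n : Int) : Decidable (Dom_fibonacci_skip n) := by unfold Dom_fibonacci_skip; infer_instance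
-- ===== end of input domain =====

-- B replaces A's precompute-then-scan loops by a branch-free stride-2 loop over index PAIRS
-- (no parity test, Fibonacci advanced two steps per turn), with a post-loop fixup (objective: alternative).

-- ===== PORT A =====
-- while len(fib) < n: fib.append(fib[-1] + fib[-2]); fuel n.toNat bounds the iterations
-- (each iteration appends one element starting from length 2, so it always suffices).
-- fib[-1], fib[-2] via pyGet?; the list always has length ≥ 2 so the .getD 0 default never fires.
def fibBuild (n : Int) : Nat → List Int → List Int
  | 0, fib => fib
  | fuel+1, fib =>
    if (fib.length : Int) < n then
      fibBuild n fuel (fib ++ [(PySem.List.pyGet? fib (-1)).getD 0 + (PySem.List.pyGet? fib (-2)).getD 0])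
    else fib

def fibonacci_skip (n : Int) : String :=
  PySem.Str.join " " ((PySem.List.pyRange 0 n 1).foldl (fun res i =>
    let res := res ++ [PySem.Int.toStr ((PySem.List.pyGet? (fibBuild n n.toNat [1, 1]) i).getD 0)]
    if PySem.Int.mod i 2 = 0 ∧ i ≠ n - 1 then res ++ ["skip"] else res) [])

-- ===== PORT B =====
-- the while loop of B: state (parts, i, a) with companion b; returns the state at loop exit
def bloop (n : Int) (parts : List String) (i a b : Int) : List String × Int × Int :=
  if _h : i < n - 1 then
    bloop n (parts ++ [PySem.Int.toStr a, "skip", PySem.Int.toStr b]) (i + 2) (a + b) (a + 2 * b)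
  else (parts, i, a)
  termination_by (n - i).toNat
  decreasing_by omega

def fibonacci_skip_alt (n : Int) : String :=
  let r := bloop n [] 0 1 1
  PySem.Str.join " " (if r.2.1 < n then r.1 ++ [PySem.Int.toStr r.2.2] else r.1)

-- ===== PRECONDITION & SPEC =====
def Spec_fibonacci_skip (n : Int) (out : String) : Prop := out = fibonacci_skip_alt n
instance (n : Int) (out : String) : Decidable (Spec_fibonacci_skip n out) := by unfold Spec_fibonacci_skip; infer_instance

-- ===== CLAIM (what is proved, stated in full; the proofs are below) =====
def Claim_equal_fibonacci_skip : Prop := ∀ (n : Int), Dom_fibonacci_skip n → Spec_fibonacci_skip n (fibonacci_skip n)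

-- ===== LEMMAS AND PROOFS =====

-- mathematical Fibonacci (1, 1, 2, …), the common value both programs produce
def fibI : Nat → Int
  | 0 => 1
  | 1 => 1
  | (k+2) => fibI k + fibI (k+1)

-- what A's loop emits for one index
def chunkF (n v i : Int) : List String :=
  [PySem.Int.toStr v] ++ (if PySem.Int.mod i 2 = 0 ∧ i ≠ n - 1 then ["skip"] else [])

lemma fibBuild_range (n : Int) (fuel m : Nat) (h2 : 2 ≤ m) (hf : n.toNat ≤ m + fuel) :
    fibBuild n fuel ((List.range m).map fibI) = (List.range (max m n.toNat)).map fibI := by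
  induction fuel generalizing m with
  | zero =>
    have : max m n.toNat = m := by omega
    simp [fibBuild, this]
  | succ fuel ih =>
    rw [fibBuild]
    by_cases h : ((((List.range m).map fibI).length : Int) < n)
    · rw [if_pos h]
      simp only [List.length_map, List.length_range] at h
      have hm : m < n.toNat := by omega
      have hget1 : (PySem.List.pyGet? ((List.range m).map fibI) (-1)).getD 0 = fibI (m-1) := by
        rw [PySem.List.pyGet?_neg_one, List.getLast?_eq_getElem?]
        simp [List.getElem?_range (show m - 1 < m by omega)]
      have hget2 : (PySem.List.pyGet? ((List.range m).map fibI) (-2)).getD 0 = fibI (m-2) := by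
        rw [show (-2 : Int) = -((2:Nat):Int) by norm_num,
            PySem.List.pyGet?_neg_natCast _ 2 (by omega) (by simpa using h2)]
        simp [List.getElem?_range (show m - 2 < m by omega)]
      rw [hget1, hget2]
      have hfib : fibI (m-1) + fibI (m-2) = fibI m := by
        obtain ⟨k, rfl⟩ : ∃ k, m = k + 2 := ⟨m - 2, by omega⟩
        simp only [Nat.add_sub_cancel, show k + 2 - 1 = k + 1 by omega, fibI]
        ring
      have hcons : (List.range m).map fibI ++ [fibI (m-1) + fibI (m-2)]
          = (List.range (m+1)).map fibI := by
        rw [hfib, List.range_succ, List.map_append, List.map_cons, List.map_nil]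
      rw [hcons, ih (m+1) (by omega) (by omega)]
      congr 2
      omega
    · rw [if_neg h]
      simp only [List.length_map, List.length_range] at h
      have : max m n.toNat = m := by omega
      simp [this]

lemma fib_index (n : Int) (i : Int) (h0 : 0 ≤ i) (h1 : i < n) :
    (PySem.List.pyGet? (fibBuild n n.toNat [1, 1]) i).getD 0 = fibI i.toNat := by
  have hinit : ([1, 1] : List Int) = (List.range 2).map fibI := by decide
  rw [hinit, fibBuild_range n n.toNat 2 (by omega) (by omega),
      PySem.List.pyGet?_of_nonneg _ h0]
  simp [List.getElem?_map, List.getElem?_range (show i.toNat < max 2 n.toNat by omega)]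

lemma A_flat (n : Int) (fib : List Int) (res : List String) :
    (PySem.List.pyRange 0 n 1).foldl (fun res i =>
      let res := res ++ [PySem.Int.toStr ((PySem.List.pyGet? fib i).getD 0)]
      if PySem.Int.mod i 2 = 0 ∧ i ≠ n - 1 then res ++ ["skip"] else res) res
    = res ++ (PySem.List.pyRange 0 n 1).flatMap (fun i => chunkF n ((PySem.List.pyGet? fib i).getD 0) i) := by
  have hb : (fun (res : List String) (i : Int) =>
      let res := res ++ [PySem.Int.toStr ((PySem.List.pyGet? fib i).getD 0)]
      if PySem.Int.mod i 2 = 0 ∧ i ≠ n - 1 then res ++ ["skip"] else res)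
      = (fun res i => res ++ chunkF n ((PySem.List.pyGet? fib i).getD 0) i) := by
    funext res i
    simp only [chunkF]
    split_ifs <;> simp
  rw [hb, PySem.List.foldl_append_eq_flatMap]

lemma mod2_cast (k : Nat) : PySem.Int.mod (k : Int) 2 = ((k % 2 : Nat) : Int) := by
  rw [PySem.Int.mod_eq_emod_of_pos (by omega : (0:Int) < 2)]
  omega

lemma mod2_cast_succ (k : Nat) : PySem.Int.mod ((k : Int) + 1) 2 = (((k + 1) % 2 : Nat) : Int) := by
  rw [PySem.Int.mod_eq_emod_of_pos (by omega : (0:Int) < 2)]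
  omega

-- B's loop followed by its fixup emits exactly A's per-index chunks over the remaining range
lemma bloop_flat (n : Int) (k : Nat) (hk : k % 2 = 0) (parts : List String) :
    (let r := bloop n parts (k : Int) (fibI k) (fibI (k+1));
     if r.2.1 < n then r.1 ++ [PySem.Int.toStr r.2.2] else r.1)
    = parts ++ (PySem.List.pyRange (k : Int) n 1).flatMap (fun i => chunkF n (fibI i.toNat) i) := by
  rw [bloop]
  by_cases h : (k : Int) < n - 1
  · rw [dif_pos h]
    have hpair1 : fibI k + fibI (k+1) = fibI (k+2) := by simp [fibI]
    have hpair2 : fibI k + 2 * fibI (k+1) = fibI (k+3) := by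
      have h3 : fibI (k+3) = fibI (k+1) + fibI (k+2) := rfl
      rw [h3, ← hpair1]; ring
    have hcast : (k : Int) + 2 = ((k+2 : Nat) : Int) := by push_cast; ring
    rw [hpair1, hpair2, hcast,
        bloop_flat n (k+2) (by omega) (parts ++ [PySem.Int.toStr (fibI k), "skip", PySem.Int.toStr (fibI (k+1))])]
    rw [PySem.List.pyRange_one_cons (show (k:Int) < n by omega),
        PySem.List.pyRange_one_cons (show (k:Int) + 1 < n by omega)]
    simp only [List.flatMap_cons, chunkF]
    rw [mod2_cast, hk]
    have hodd : ¬ (PySem.Int.mod ((k : Int) + 1) 2 = 0 ∧ (k : Int) + 1 ≠ n - 1) := by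
      rw [mod2_cast_succ]
      intro ⟨h1, _⟩
      omega
    rw [if_pos ⟨by norm_num, by omega⟩, if_neg hodd]
    have : (k : Int) + 1 + 1 = ((k+2 : Nat) : Int) := by push_cast; ring
    rw [this]
    simp
  · rw [dif_neg h]
    by_cases h2 : (k : Int) < n
    · have hlast : (k : Int) = n - 1 := by omega
      simp only [if_pos h2]
      rw [PySem.List.pyRange_one_cons h2, PySem.List.pyRange_one_eq_nil (by omega)]
      simp only [List.flatMap_cons, List.flatMap_nil, chunkF]
      rw [if_neg (by intro ⟨_, hne⟩; exact hne hlast)]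
      simp
    · simp only [if_neg h2]
      rw [PySem.List.pyRange_one_eq_nil (by omega)]
      simp
  termination_by (n - (k : Int)).toNat
  decreasing_by omega

-- ===== VERDICT (by name: the statement is the Claim_ definition above) =====
theorem fibonacci_skip_spec : Claim_equal_fibonacci_skip := by
  intro n _
  unfold Spec_fibonacci_skip fibonacci_skip fibonacci_skip_alt
  rw [A_flat]
  have hB := bloop_flat n 0 (by omega) []
  simp only [Nat.cast_zero, fibI] at hB
  simp only [hB]
  congr 1
  simp only [List.nil_append]
  apply List.flatMap_congr
  intro i hi
  rw [PySem.List.mem_pyRange_one] at hi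
  rw [fib_index n i hi.1 hi.2]
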